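-- pv_equiv track=rewrite | github.com/wyk18703232953/myResearch | codeComplex/data copy/filteredData/python/quadratic/python_quadratic_0030.py | generate_C_input
-- ===== SOURCE A (Python) =====
-- def generate_C_input(n):
--     # Deterministic pattern: half 'f', half 's' (or nearby)
--     s = []
--     for i in range(n):
--         if i % 2 == 0:
--             s.append('f')
--
--         else:
--             s.append('s')
--     return s
-- ===== SOURCE B (Python) =====
-- def generate_C_input(n):
--     # whole-list construction: replicate the two-element block, then truncate
--     return (['f', 's'] * ((n + 1) // 2))[:n]
-- ===== Notes on version B (the rewrite author's own statement) =====
-- stated objective: idiomatic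
-- what changed: Replaces the element-wise loop with a parity branch by replicating the two-element block ['f','s'] and truncating with a slice; the per-element Python-level branch disappears into C-level list repetition.
import Mathlib
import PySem

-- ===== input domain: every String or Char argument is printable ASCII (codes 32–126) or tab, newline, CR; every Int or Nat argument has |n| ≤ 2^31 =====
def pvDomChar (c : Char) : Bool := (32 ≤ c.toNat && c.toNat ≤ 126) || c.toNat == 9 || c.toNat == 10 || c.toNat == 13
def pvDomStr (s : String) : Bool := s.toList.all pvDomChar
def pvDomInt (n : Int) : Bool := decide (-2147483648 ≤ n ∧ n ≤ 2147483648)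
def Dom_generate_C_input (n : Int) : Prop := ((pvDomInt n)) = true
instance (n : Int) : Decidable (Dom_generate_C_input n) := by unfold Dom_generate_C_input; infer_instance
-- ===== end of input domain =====

-- B builds the list by replicating the block ['f','s'] and truncating, instead of A's
-- element-wise loop with a parity branch (objective: idiomatic; same cost).

-- ===== PORT A =====
def generate_C_input (n : Int) : List String :=
  (PySem.List.pyRange 0 n 1).foldl
    (fun s i => if PySem.Int.mod i 2 == 0 then s ++ ["f"] else s ++ ["s"]) []

-- ===== PORT B =====
def generate_C_input_alt (n : Int) : List String :=
  PySem.List.slice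
    ((List.replicate (PySem.Int.floordiv (n + 1) 2).toNat (["f", "s"] : List String)).flatten)
    none (some n)

-- ===== PRECONDITION & SPEC =====
def Spec_generate_C_input (n : Int) (out : List String) : Prop := out = generate_C_input_alt n
instance (n : Int) (out : List String) : Decidable (Spec_generate_C_input n out) := by unfold Spec_generate_C_input; infer_instance

-- ===== CLAIM (what is proved, stated in full; the proofs are below) =====
def Claim_equal_generate_C_input : Prop := ∀ (n : Int), Dom_generate_C_input n → Spec_generate_C_input n (generate_C_input n)

-- ===== LEMMAS AND PROOFS =====

def pvPat (i : Nat) : String := if i % 2 = 0 then "f" else "s"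

theorem pvBlk_eq (m : Nat) :
    (List.replicate m (["f", "s"] : List String)).flatten = (List.range (2 * m)).map pvPat := by
  induction m with
  | zero => simp
  | succ m ih =>
    have h2 : 2 * (m + 1) = 2 + 2 * m := by ring
    rw [List.replicate_succ, List.flatten_cons, ih, h2, List.range_add, List.map_append]
    simp [List.range_succ, pvPat]

theorem pvA_eq (k : Nat) : generate_C_input (k : Int) = (List.range k).map pvPat := by
  induction k with
  | zero => simp [generate_C_input, PySem.List.pyRange_one_eq_nil]
  | succ k ih =>
    unfold generate_C_input at *
    have hc : ((k : Int) + 1) = ((k + 1 : Nat) : Int) := by push_cast; ring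
    rw [← hc, PySem.List.pyRange_one_succ_right (Int.natCast_nonneg k),
        List.foldl_append, ih, List.range_succ, List.map_append]
    by_cases h : k % 2 = 0 <;> simp [List.foldl, h, pvPat] <;> omega

theorem generate_C_input_eq (n : Int) : generate_C_input n = generate_C_input_alt n := by
  by_cases h : 0 ≤ n
  · obtain ⟨k, rfl⟩ := Int.eq_ofNat_of_zero_le h
    unfold generate_C_input_alt
    have hfd : PySem.Int.floordiv ((k : Int) + 1) 2 = (((k + 1) / 2 : Nat) : Int) := by
      rw [PySem.Int.floordiv, Int.fdiv_eq_ediv_of_nonneg _ (by omega)]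
      omega
    rw [hfd, Int.toNat_natCast, pvBlk_eq, PySem.List.slice_to_natCast,
        ← List.map_take, List.take_range, pvA_eq]
    have hmin : min k (2 * ((k + 1) / 2)) = k := by omega
    rw [hmin]
  · have hA : generate_C_input n = [] := by
      simp [generate_C_input, PySem.List.pyRange_one_eq_nil (show n ≤ 0 by omega)]
    have hm : (PySem.Int.floordiv (n + 1) 2).toNat = 0 := by
      rw [PySem.Int.floordiv, Int.fdiv_eq_ediv_of_nonneg _ (by omega)]
      omega
    unfold generate_C_input_alt
    rw [hm, hA]
    simp [PySem.List.slice]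

-- ===== VERDICT (by name: the statement is the Claim_ definition above) =====
theorem generate_C_input_spec : Claim_equal_generate_C_input := by
  intro n _
  exact generate_C_input_eq n
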